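-- pv_equiv track=rewrite | github.com/dwanev/NUTS | nar_utils.py | cascade_join
-- ===== SOURCE A (Python) =====
-- def cascade_join(list_of_elements, op="&", property=True):
--     """
--     Takes a list of items, and combins them into an recursive and statement
--     i.e.
--         ['walks', 'talks', 'eats']
--     into
--        str: '(& [walks] (& [talks] [eats]))'
--     """
--     statement = ""
--     if property:
--         for i in range(len(list_of_elements)-2, -1, -1):
--             if i == len(list_of_elements)-2:
--                 statement = "("+op+" ["+list_of_elements[-2]+"] ["+list_of_elements[-1]+"])"
--             else:
--                 statement = "("+op+" ["+list_of_elements[i]+"] "+statement+")"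
--     else:
--         for i in range(len(list_of_elements)-2, -1, -1):
--             if i == len(list_of_elements)-2:
--                 statement = "("+op+" "+list_of_elements[-2]+" "+list_of_elements[-1]+")"
--             else:
--                 statement = "("+op+" "+list_of_elements[i]+" "+statement+")"
--
--     return statement
-- ===== SOURCE B (Python) =====
-- def cascade_join(list_of_elements, op="&", property=True):
--     n = len(list_of_elements)
--     if n < 2:
--         return ""
--     if n == 2:
--         a, b = list_of_elements
--         if property:
--             return "(" + op + " [" + a + "] [" + b + "])"
--         return "(" + op + " " + a + " " + b + ")"
--     head = list_of_elements[0]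
--     rest = cascade_join(list_of_elements[1:], op, property)
--     if property:
--         return "(" + op + " [" + head + "] " + rest + ")"
--     return "(" + op + " " + head + " " + rest + ")"
-- ===== Notes on version B (the rewrite author's own statement) =====
-- stated objective: simpler
-- what changed: Replaces the backward index loop with its first-iteration flag and negative indexing by a direct front-to-back structural recursion with two base cases.
import Mathlib
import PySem

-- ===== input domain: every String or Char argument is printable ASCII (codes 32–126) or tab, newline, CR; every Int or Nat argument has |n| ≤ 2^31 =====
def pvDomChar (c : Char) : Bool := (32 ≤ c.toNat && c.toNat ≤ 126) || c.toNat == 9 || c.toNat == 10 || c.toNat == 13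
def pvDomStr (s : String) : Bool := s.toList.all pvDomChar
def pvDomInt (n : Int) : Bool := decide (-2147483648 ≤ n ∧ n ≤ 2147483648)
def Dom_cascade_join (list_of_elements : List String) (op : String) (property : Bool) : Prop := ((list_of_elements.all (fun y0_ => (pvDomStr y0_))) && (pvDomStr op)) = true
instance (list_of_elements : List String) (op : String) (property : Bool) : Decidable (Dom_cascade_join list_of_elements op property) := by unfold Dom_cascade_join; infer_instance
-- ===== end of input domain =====

-- B replaces A's backward index loop (first-iteration flag, negative indexing) by a direct
-- front-to-back structural recursion with two base cases; objective: simpler.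

-- ===== PORT A =====
-- xs[i] for possibly negative i; every index A reads is in range, so the "" default is never used
def cjGet (l : List String) (i : Int) : String := (PySem.List.pyGet? l i).getD ""

def cascade_join (list_of_elements : List String) (op : String) (property : Bool) : String :=
  let n : Int := list_of_elements.length
  if property then
    (PySem.List.pyRange (n - 2) (-1) (-1)).foldl (fun statement i =>
      if i = n - 2 then
        "(" ++ op ++ " [" ++ cjGet list_of_elements (-2) ++ "] [" ++ cjGet list_of_elements (-1) ++ "])"
      else
        "(" ++ op ++ " [" ++ cjGet list_of_elements i ++ "] " ++ statement ++ ")") ""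
  else
    (PySem.List.pyRange (n - 2) (-1) (-1)).foldl (fun statement i =>
      if i = n - 2 then
        "(" ++ op ++ " " ++ cjGet list_of_elements (-2) ++ " " ++ cjGet list_of_elements (-1) ++ ")"
      else
        "(" ++ op ++ " " ++ cjGet list_of_elements i ++ " " ++ statement ++ ")") ""

-- ===== PORT B =====
def cascade_join_alt (list_of_elements : List String) (op : String) (property : Bool) : String :=
  match list_of_elements with
  | [] => ""
  | [_] => ""
  | [a, b] =>
      if property then "(" ++ op ++ " [" ++ a ++ "] [" ++ b ++ "])"
      else "(" ++ op ++ " " ++ a ++ " " ++ b ++ ")"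
  | a :: rest =>
      if property then "(" ++ op ++ " [" ++ a ++ "] " ++ cascade_join_alt rest op property ++ ")"
      else "(" ++ op ++ " " ++ a ++ " " ++ cascade_join_alt rest op property ++ ")"

-- ===== PRECONDITION & SPEC =====
def Spec_cascade_join (list_of_elements : List String) (op : String) (property : Bool) (out : String) : Prop := out = cascade_join_alt list_of_elements op property
instance (list_of_elements : List String) (op : String) (property : Bool) (out : String) : Decidable (Spec_cascade_join list_of_elements op property out) := by unfold Spec_cascade_join; infer_instance

-- ===== CLAIM (what is proved, stated in full; the proofs are below) =====
def Claim_equal_cascade_join : Prop := ∀ (list_of_elements : List String) (op : String) (property : Bool), Dom_cascade_join list_of_elements op property → Spec_cascade_join list_of_elements op property (cascade_join list_of_elements op property)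

-- ===== LEMMAS AND PROOFS =====

-- Generic forms, parametrized by the literal pieces so that both property shapes are ONE shape:
--   property = true:  lo = " [", b2 = "] [", b3 = "])", sep = "] "
--   property = false: lo = " ",  b2 = " ",   b3 = ")",  sep = " "
def cjBody (lo b2 b3 sep : String) (op : String) (l : List String) (n : Int)
    (statement : String) (i : Int) : String :=
  if i = n - 2 then
    "(" ++ op ++ lo ++ cjGet l (-2) ++ b2 ++ cjGet l (-1) ++ b3
  else
    "(" ++ op ++ lo ++ cjGet l i ++ sep ++ statement ++ ")"

def cjAltG (lo b2 b3 sep : String) (op : String) : List String → String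
  | [] => ""
  | [_] => ""
  | [a, b] => "(" ++ op ++ lo ++ a ++ b2 ++ b ++ b3
  | a :: rest => "(" ++ op ++ lo ++ a ++ sep ++ cjAltG lo b2 b3 sep op rest ++ ")"

def cjLo (property : Bool) : String := if property then " [" else " "
def cjB2 (property : Bool) : String := if property then "] [" else " "
def cjB3 (property : Bool) : String := if property then "])" else ")"
def cjSep (property : Bool) : String := if property then "] " else " "

lemma cj_eq_foldl (l : List String) (op : String) (property : Bool) :
    cascade_join l op property =
      (PySem.List.pyRange ((l.length : Int) - 2) (-1) (-1)).foldl
        (cjBody (cjLo property) (cjB2 property) (cjB3 property) (cjSep property) op l l.length) "" := by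
  cases property <;> rfl

lemma alt_eq_altG (op : String) (property : Bool) :
    ∀ l, cascade_join_alt l op property =
      cjAltG (cjLo property) (cjB2 property) (cjB3 property) (cjSep property) op l
  | [] => rfl
  | [_] => rfl
  | [a, b] => by cases property <;> rfl
  | a :: b :: c :: t => by
    have ih := alt_eq_altG op property (b :: c :: t)
    cases property <;> simp_all [cascade_join_alt, cjAltG, cjLo, cjB2, cjB3, cjSep]

lemma altG_step (lo b2 b3 sep op : String) (a : String) (rest : List String) (h : 2 ≤ rest.length) :
    cjAltG lo b2 b3 sep op (a :: rest) =
      "(" ++ op ++ lo ++ a ++ sep ++ cjAltG lo b2 b3 sep op rest ++ ")" := by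
  match rest, h with
  | b :: c :: t, _ => rfl

lemma cj_body_step (lo b2 b3 sep op : String) (l : List String) (j : Nat) (hj : j + 2 ≤ l.length)
    (s : String) (hs : s = cjAltG lo b2 b3 sep op (l.drop (j + 1))) :
    cjBody lo b2 b3 sep op l l.length s (j : Int) = cjAltG lo b2 b3 sep op (l.drop j) := by
  subst hs
  have hdrop : l.drop j = l[j] :: l.drop (j + 1) := by
    rw [List.drop_eq_getElem_cons (by omega)]
  have hget : cjGet l (j : Int) = l[j] := by
    simp [cjGet, PySem.List.pyGet?_natCast, List.getElem?_eq_getElem (by omega : j < l.length)]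
  by_cases hlast : j + 2 = l.length
  · -- last two elements: the base case of both forms
    have h2 : (l.drop j).length = 2 := by simp; omega
    obtain ⟨x, y, hxy⟩ : ∃ x y, l.drop j = [x, y] := by
      match hdd : l.drop j, h2 with
      | [x, y], _ => exact ⟨x, y, rfl⟩
    have hx : l[j] = x := by rw [hdrop] at hxy; exact (List.cons.injEq _ _ _ _ ▸ hxy).1
    have hy : l.drop (j + 1) = [y] := by rw [hdrop] at hxy; exact (List.cons.injEq _ _ _ _ ▸ hxy).2
    have hgm2 : cjGet l (-2) = x := by
      have he : PySem.List.pyGet? l (-2) = l[l.length - 2]? := by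
        rw [PySem.List.pyGet?_neg_ofNat l 2 (by omega) (by omega)]
      have hjl : l.length - 2 = j := by omega
      rw [cjGet, he, hjl, List.getElem?_eq_getElem (by omega), ← hx]
      rfl
    have hgm1 : cjGet l (-1) = y := by
      have hyy : l[j + 1]'(by omega) = y := by
        have hd := List.drop_eq_getElem_cons (l := l) (i := j + 1) (show j + 1 < l.length by omega)
        rw [hd] at hy
        exact (List.cons.injEq _ _ _ _ ▸ hy).1
      have he : PySem.List.pyGet? l (-1) = l.getLast? := PySem.List.pyGet?_neg_one l
      rw [cjGet, he, List.getLast?_eq_getElem?, List.getElem?_eq_getElem (by omega)]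
      have hl1 : l.length - 1 = j + 1 := by omega
      simp [hl1, hyy]
    rw [hxy]
    simp only [cjBody, cjAltG]
    rw [if_pos (by omega), hgm2, hgm1]
  · -- interior element: the wrapping case
    have h2 : 2 ≤ (l.drop (j + 1)).length := by simp; omega
    rw [cjBody, if_neg (by omega), hget, hdrop, altG_step lo b2 b3 sep op _ _ h2]

lemma cj_loop (lo b2 b3 sep op : String) (l : List String) :
    ∀ (j : Nat), j + 2 ≤ l.length →
      (PySem.List.pyRange (j : Int) (-1) (-1)).foldl (cjBody lo b2 b3 sep op l l.length)
        (cjAltG lo b2 b3 sep op (l.drop (j + 1))) = cjAltG lo b2 b3 sep op l := by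
  intro j
  induction j with
  | zero =>
    intro h
    rw [PySem.List.pyRange_neg_one_cons (by omega), PySem.List.pyRange_neg_one_eq_nil (by omega)]
    have hs := cj_body_step lo b2 b3 sep op l 0 h _ rfl
    simpa using hs
  | succ k ih =>
    intro h
    rw [PySem.List.pyRange_neg_one_cons (by push_cast; omega)]
    have hstep := cj_body_step lo b2 b3 sep op l (k + 1) h _ rfl
    simp only [List.foldl_cons]
    push_cast at hstep ⊢
    rw [hstep]
    rw [show ((k : Int) + 1 - 1) = (k : Int) from by ring]
    exact ih (by omega)

-- ===== VERDICT (by name: the statement is the Claim_ definition above) =====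
theorem cascade_join_spec : Claim_equal_cascade_join := by
  intro l op property _
  show cascade_join l op property = cascade_join_alt l op property
  rw [cj_eq_foldl, alt_eq_altG]
  by_cases h2 : 2 ≤ l.length
  · have hinit : cjAltG (cjLo property) (cjB2 property) (cjB3 property) (cjSep property) op
        (l.drop (l.length - 2 + 1)) = "" := by
      have hle : (l.drop (l.length - 2 + 1)).length ≤ 1 := by simp; omega
      match hd : l.drop (l.length - 2 + 1), hle with
      | [], _ => rfl
      | [x], _ => rfl
      | x :: y :: t, hle => simp at hle
    have hmain := cj_loop (cjLo property) (cjB2 property) (cjB3 property) (cjSep property) op l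
      (l.length - 2) (by omega)
    rw [hinit] at hmain
    rw [show ((l.length : Int) - 2) = ((l.length - 2 : Nat) : Int) from by omega]
    exact hmain
  · rw [PySem.List.pyRange_neg_one_eq_nil (by omega)]
    match l, h2 with
    | [], _ => rfl
    | [x], _ => rfl
    | x :: y :: t, h2 => exact absurd (by simp [List.length_cons]) h2
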